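-- pv_equiv track=rewrite | github.com/Priyanshi0912/DSA | GFG PODT JUNE/26 June  Coverage of all Zeros in a Binary Matrix.py | findCoverage
-- ===== SOURCE A (Python) =====
-- def findCoverage(matrix):
--     n = len(matrix)
--     m = len(matrix[0])
--     ans = 0
--
--     for i in range(n):
--         for j in range(m):
--             if matrix[i][j] == 0:
--                 if i - 1 >= 0 and matrix[i - 1][j] == 1:  # Check top neighbor
--                     ans += 1
--                 if i + 1 < n and matrix[i + 1][j] == 1:  # Check bottom neighbor
--                     ans += 1
--                 if j - 1 >= 0 and matrix[i][j - 1] == 1:  # Check left neighbor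
--                     ans += 1
--                 if j + 1 < m and matrix[i][j + 1] == 1:  # Check right neighbor
--                     ans += 1
--
--     return ans
-- ===== SOURCE B (Python) =====
-- def findCoverage(matrix):
--     m = len(matrix[0])
--     rows = [row[:m] for row in matrix]  # the grid is as wide as its first row
--     ans = 0
--     # horizontal adjacencies: each row against itself shifted by one
--     for row in rows:
--         for a, b in zip(row, row[1:]):
--             if (a == 0 and b == 1) or (a == 1 and b == 0):
--                 ans += 1
--     # vertical adjacencies: each pair of consecutive rows
--     for r1, r2 in zip(rows, rows[1:]):
--         for a, b in zip(r1, r2):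
--             if (a == 0 and b == 1) or (a == 1 and b == 0):
--                 ans += 1
--     return ans
-- ===== Notes on version B (the rewrite author's own statement) =====
-- stated objective: simpler
-- what changed: B replaces A's per-zero-cell scan of all four neighbors (with boundary tests and indexed access) by two index-free zip passes over the rows sliced to the first row's width: each row zipped with its shift gives the horizontal 0/1 pairs and each pair of consecutive rows the vertical ones, so every adjacency is counted exactly once.
import Mathlib
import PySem

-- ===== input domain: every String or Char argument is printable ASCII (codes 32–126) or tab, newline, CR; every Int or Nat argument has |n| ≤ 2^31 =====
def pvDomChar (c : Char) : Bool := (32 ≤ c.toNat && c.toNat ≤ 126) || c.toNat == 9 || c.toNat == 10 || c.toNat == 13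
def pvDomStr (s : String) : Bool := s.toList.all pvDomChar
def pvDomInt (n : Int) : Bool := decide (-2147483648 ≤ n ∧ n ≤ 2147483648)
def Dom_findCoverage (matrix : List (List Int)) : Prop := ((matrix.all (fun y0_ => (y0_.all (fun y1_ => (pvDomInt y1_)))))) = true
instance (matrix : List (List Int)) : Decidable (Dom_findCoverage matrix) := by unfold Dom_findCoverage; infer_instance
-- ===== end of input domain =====

-- B counts each 0/1 adjacency once via two zip passes (row with its shift, row with next row)
-- instead of A's four-neighbor scan from every zero cell: simpler, index-free decomposition.


-- ===== PORT A =====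
-- matrix[i][j]: in-range under Pre_; PySem.List.pyGetD is exact there
def aGet (matrix : List (List Int)) (i j : Int) : Int :=
  PySem.List.pyGetD (PySem.List.pyGetD matrix i []) j 0

-- body of A's inner loop (the four neighbor checks of one cell)
def cellStepA (matrix : List (List Int)) (n m i : Int) (ans j : Int) : Int :=
  if aGet matrix i j = 0 then
    let ans := if i - 1 ≥ 0 ∧ aGet matrix (i - 1) j = 1 then ans + 1 else ans
    let ans := if i + 1 < n ∧ aGet matrix (i + 1) j = 1 then ans + 1 else ans
    let ans := if j - 1 ≥ 0 ∧ aGet matrix i (j - 1) = 1 then ans + 1 else ans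
    let ans := if j + 1 < m ∧ aGet matrix i (j + 1) = 1 then ans + 1 else ans
    ans
  else ans

-- body of A's outer loop (one row: for j in range(m))
def rowStepA (matrix : List (List Int)) (n m : Int) (ans i : Int) : Int :=
  (PySem.List.pyRange 0 m).foldl (cellStepA matrix n m i) ans

def findCoverage (matrix : List (List Int)) : Int :=
  let n : Int := matrix.length
  let m : Int := (PySem.List.pyGetD matrix 0 []).length
  (PySem.List.pyRange 0 n).foldl (rowStepA matrix n m) 0

-- ===== PORT B =====
def pairStep (ans : Int) (p : Int × Int) : Int :=
  if (p.1 = 0 ∧ p.2 = 1) ∨ (p.1 = 1 ∧ p.2 = 0) then ans + 1 else ans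

-- one row zipped with its shift row[1:]
def hRowStep (ans : Int) (row : List Int) : Int :=
  ((row.zip (row.drop 1)).foldl pairStep ans)

-- a pair of consecutive rows zipped together
def vRowStep (ans : Int) (rr : List Int × List Int) : Int :=
  ((rr.1.zip rr.2).foldl pairStep ans)

def findCoverage_alt (matrix : List (List Int)) : Int :=
  let m : Int := (PySem.List.pyGetD matrix 0 []).length
  let rows := matrix.map (fun row => PySem.List.slice row none (some m))
  let h := rows.foldl hRowStep 0
  (rows.zip (rows.drop 1)).foldl vRowStep h

-- ===== PRECONDITION & SPEC =====
-- Pre_ excludes exactly the inputs on which A raises IndexError: the empty matrix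
-- (matrix[0]) and matrices with some row shorter than the first row.
def Pre_findCoverage (matrix : List (List Int)) : Prop :=
  matrix ≠ [] ∧ ∀ row ∈ matrix, (matrix.headD []).length ≤ row.length
instance (matrix : List (List Int)) : Decidable (Pre_findCoverage matrix) := by
  unfold Pre_findCoverage; infer_instance
def pvWitness_findCoverage : List (List Int) := [[0, 1], [1, 0]]

def Spec_findCoverage (matrix : List (List Int)) (out : Int) : Prop := out = findCoverage_alt matrix
instance (matrix : List (List Int)) (out : Int) : Decidable (Spec_findCoverage matrix out) := by unfold Spec_findCoverage; infer_instance

-- ===== CLAIM (what is proved, stated in full; the proofs are below) =====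
def Claim_equal_findCoverage : Prop := ∀ (matrix : List (List Int)), Dom_findCoverage matrix → Pre_findCoverage matrix → Spec_findCoverage matrix (findCoverage matrix)

-- ===== LEMMAS AND PROOFS =====

-- sum of f over 0..k-1
def S (k : Nat) (f : Nat → Int) : Int := ((List.range k).map f).sum

def iInd (P : Prop) [Decidable P] : Int := if P then 1 else 0

def pInd (a b : Int) : Int := if (a = 0 ∧ b = 1) ∨ (a = 1 ∧ b = 0) then 1 else 0

-- total cell access used by the sum forms
def g (M : List (List Int)) (i j : Nat) : Int := (M.getD i []).getD j 0

-- Nat-level value added by A for one cell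
def aCellg (f : Nat → Nat → Int) (n m i j : Nat) : Int :=
  if f i j = 0 then
    iInd (1 ≤ i ∧ f (i - 1) j = 1) + iInd (i + 1 < n ∧ f (i + 1) j = 1) +
    iInd (1 ≤ j ∧ f i (j - 1) = 1) + iInd (j + 1 < m ∧ f i (j + 1) = 1)
  else 0

-- Int-level value added by A for one cell
def cellValA (M : List (List Int)) (n m i j : Int) : Int :=
  if aGet M i j = 0 then
    iInd (i - 1 ≥ 0 ∧ aGet M (i - 1) j = 1) + iInd (i + 1 < n ∧ aGet M (i + 1) j = 1) +
    iInd (j - 1 ≥ 0 ∧ aGet M i (j - 1) = 1) + iInd (j + 1 < m ∧ aGet M i (j + 1) = 1)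
  else 0

theorem S_succ (k : Nat) (f : Nat → Int) : S (k + 1) f = S k f + f k := by
  simp [S, List.range_succ]

theorem S_shift (k : Nat) (f : Nat → Int) :
    S (k + 1) f = f 0 + S k (fun j => f (j + 1)) := by
  simp [S, List.range_succ_eq_map, List.map_map, Function.comp_def]

theorem S_congr {k : Nat} {f f' : Nat → Int} (h : ∀ j < k, f j = f' j) : S k f = S k f' := by
  unfold S
  rw [List.map_congr_left (fun a ha => h a (List.mem_range.mp ha))]

@[simp] theorem S_zero_fun (k : Nat) : S k (fun _ => 0) = 0 := by simp [S]

theorem S_add (k : Nat) (u v : Nat → Int) :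
    S k (fun j => u j + v j) = S k u + S k v := by
  induction k with
  | zero => simp [S]
  | succ k ih => rw [S_succ, S_succ, S_succ, ih]; ring

theorem S_truncate (k : Nat) (f : Nat → Int) :
    S k (fun j => if j + 1 < k then f j else 0) = S (k - 1) f := by
  cases k with
  | zero => simp [S]
  | succ k =>
    rw [S_succ]
    simp only [Nat.add_lt_add_iff_right, lt_irrefl, if_false, add_zero, Nat.succ_sub_one]
    exact S_congr fun j hj => by simp [hj]

theorem S_shift_vanish (k : Nat) (f : Nat → Int) (h0 : f 0 = 0) :
    S k f = S (k - 1) (fun j => f (j + 1)) := by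
  cases k with
  | zero => simp [S]
  | succ k => rw [S_shift, h0, zero_add, Nat.succ_sub_one]

theorem S_if_pull (k : Nat) (C : Prop) [Decidable C] (h : Nat → Int) :
    S k (fun j => if C then h j else 0) = if C then S k h else 0 := by
  by_cases hC : C <;> simp [hC]

theorem iInd_congr {P Q : Prop} [Decidable P] [Decidable Q] (h : P ↔ Q) : iInd P = iInd Q := by
  simp [iInd, h]

theorem iInd_and_left (P Q : Prop) [Decidable P] [Decidable Q] :
    iInd (P ∧ Q) = if P then iInd Q else 0 := by
  by_cases hP : P <;> simp [iInd, hP]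

theorem pInd_split (a b : Int) :
    iInd (a = 0 ∧ b = 1) + iInd (b = 0 ∧ a = 1) = pInd a b := by
  unfold iInd pInd; split_ifs <;> omega

theorem pairStep_eq (ans : Int) (p : Int × Int) : pairStep ans p = ans + pInd p.1 p.2 := by
  unfold pairStep pInd; split_ifs <;> ring

theorem cellStepA_eq (M : List (List Int)) (n m i ans j : Int) :
    cellStepA M n m i ans j = ans + cellValA M n m i j := by
  simp only [cellStepA, cellValA, iInd]
  split_ifs <;> ring

-- cast bridge: A's Int-level cell value at Nat indices is the Nat-level one
theorem cellCast (M : List (List Int)) (n m i j : Nat) :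
    cellValA M (n : Int) (m : Int) (i : Int) (j : Int) = aCellg (g M) n m i j := by
  have hget : ∀ (a b : Nat), aGet M (a : Int) (b : Int) = g M a b := by
    intro a b
    simp [aGet, g, PySem.List.pyGetD_natCast]
  have h1 : iInd ((i : Int) - 1 ≥ 0 ∧ aGet M ((i : Int) - 1) (j : Int) = 1)
      = iInd (1 ≤ i ∧ g M (i - 1) j = 1) := by
    apply iInd_congr
    by_cases hi : 1 ≤ i
    · have hc : (i : Int) - 1 = ((i - 1 : Nat) : Int) := by omega
      rw [hc, hget]
      constructor <;> rintro ⟨h1, h2⟩ <;> exact ⟨by omega, h2⟩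
    · constructor <;> (rintro ⟨h1, -⟩; exact absurd h1 (by omega))
  have h2 : iInd ((i : Int) + 1 < (n : Int) ∧ aGet M ((i : Int) + 1) (j : Int) = 1)
      = iInd (i + 1 < n ∧ g M (i + 1) j = 1) := by
    apply iInd_congr
    have hc : (i : Int) + 1 = ((i + 1 : Nat) : Int) := by omega
    rw [hc, hget]
    constructor <;> rintro ⟨h1, h2⟩ <;> exact ⟨by omega, h2⟩
  have h3 : iInd ((j : Int) - 1 ≥ 0 ∧ aGet M (i : Int) ((j : Int) - 1) = 1)
      = iInd (1 ≤ j ∧ g M i (j - 1) = 1) := by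
    apply iInd_congr
    by_cases hj : 1 ≤ j
    · have hc : (j : Int) - 1 = ((j - 1 : Nat) : Int) := by omega
      rw [hc, hget]
      constructor <;> rintro ⟨h1, h2⟩ <;> exact ⟨by omega, h2⟩
    · constructor <;> (rintro ⟨h1, -⟩; exact absurd h1 (by omega))
  have h4 : iInd ((j : Int) + 1 < (m : Int) ∧ aGet M (i : Int) ((j : Int) + 1) = 1)
      = iInd (j + 1 < m ∧ g M i (j + 1) = 1) := by
    apply iInd_congr
    have hc : (j : Int) + 1 = ((j + 1 : Nat) : Int) := by omega
    rw [hc, hget]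
    constructor <;> rintro ⟨h1, h2⟩ <;> exact ⟨by omega, h2⟩
  unfold cellValA aCellg
  rw [hget i j, h1, h2, h3, h4]

-- A's port as a double sum
theorem A_sum (M : List (List Int)) (m : Nat) (hm : (PySem.List.pyGetD M 0 []).length = m) :
    findCoverage M = S M.length (fun i => S m (fun j => aCellg (g M) M.length m i j)) := by
  have hrow : ∀ (ans i : Int),
      rowStepA M (M.length : Int) (m : Int) ans i
        = ans + S m (fun j => cellValA M (M.length : Int) (m : Int) i (j : Int)) := by
    intro ans i
    unfold rowStepA
    rw [PySem.List.pyRange_zero_natCast, List.foldl_map]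
    have : (fun (a : Int) (k : Nat) => cellStepA M (M.length : Int) (m : Int) i a (k : Int))
        = fun (a : Int) (k : Nat) =>
            a + (fun k : Nat => cellValA M (M.length : Int) (m : Int) i (k : Int)) k := by
      funext a k; exact cellStepA_eq ..
    rw [this, PySem.List.foldl_add]
    rfl
  show (PySem.List.pyRange 0 (M.length : Int)).foldl
      (rowStepA M (M.length : Int) ((PySem.List.pyGetD M 0 []).length : Int)) 0 = _
  rw [hm, PySem.List.pyRange_zero_natCast, List.foldl_map]
  have : (fun (a : Int) (k : Nat) => rowStepA M (M.length : Int) (m : Int) a (k : Int))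
      = fun (a : Int) (k : Nat) =>
          a + (fun k : Nat =>
            S m (fun j => cellValA M (M.length : Int) (m : Int) (k : Int) (j : Int))) k := by
    funext a k; exact hrow a k
  rw [this, PySem.List.foldl_add, zero_add]
  show S M.length _ = _
  exact S_congr fun i _ => S_congr fun j _ => cellCast ..

-- generic zip-with-shift fold as a sum over indices
theorem foldl_zip_drop {α : Type} (step : Int → α × α → Int) (F : α → α → Int) (d : α)
    (hstep : ∀ ans p, step ans p = ans + F p.1 p.2) :
    ∀ (l : List α) (c : Int),
      (l.zip (l.drop 1)).foldl step c
        = c + S (l.length - 1) (fun i => F (l.getD i d) (l.getD (i + 1) d)) := by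
  intro l
  induction l with
  | nil => intro c; simp [S]
  | cons a rest ih =>
    intro c
    cases rest with
    | nil => simp [S]
    | cons b t =>
      have hz : (a :: b :: t).zip ((a :: b :: t).drop 1)
          = (a, b) :: ((b :: t).zip ((b :: t).drop 1)) := by simp
      rw [hz, List.foldl_cons, hstep, ih]
      have hlen : (a :: b :: t).length - 1 = ((b :: t).length - 1) + 1 := by simp
      rw [hlen, S_shift]
      simp only [List.getD_cons_succ, List.getD_cons_zero]
      ring

-- zip of two lists fold as a sum over indices
theorem foldl_zip2 :
    ∀ (r1 r2 : List Int) (c : Int),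
      (r1.zip r2).foldl pairStep c
        = c + S (min r1.length r2.length) (fun j => pInd (r1.getD j 0) (r2.getD j 0)) := by
  intro r1
  induction r1 with
  | nil => intro r2 c; simp [S]
  | cons a t1 ih =>
    intro r2 c
    cases r2 with
    | nil => simp [S]
    | cons b t2 =>
      rw [List.zip_cons_cons, List.foldl_cons, ih, pairStep_eq]
      have hmin : min (a :: t1).length (b :: t2).length = (min t1.length t2.length) + 1 := by
        simp [Nat.succ_min_succ]
      rw [hmin, S_shift]
      simp only [List.getD_cons_succ, List.getD_cons_zero]
      ring

-- a mapped list sum as a sum over indices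
theorem list_sum_index {α : Type} (F : α → Int) (d : α) :
    ∀ (l : List α), (l.map F).sum = S l.length (fun i => F (l.getD i d)) := by
  intro l
  induction l with
  | nil => simp [S]
  | cons a t ih =>
    rw [List.map_cons, List.sum_cons, ih, List.length_cons, S_shift]
    simp only [List.getD_cons_succ, List.getD_cons_zero]

-- getD through take, below the cut
theorem take_getD (l : List Int) (m j : Nat) (hj : j < m) :
    (l.take m).getD j 0 = l.getD j 0 := by
  rcases Nat.lt_or_ge j l.length with h | h
  · rw [List.getD_eq_getElem _ _ (by simp; omega),
        List.getD_eq_getElem _ _ h, List.getElem_take]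
  · rw [List.getD_eq_default _ _ (by simp; omega), List.getD_eq_default _ _ h]

-- B's port as two double sums (rows are at least as wide as the first)
theorem B_sum (M : List (List Int)) (m : Nat)
    (hm : (PySem.List.pyGetD M 0 []).length = m)
    (hge : ∀ row ∈ M, m ≤ row.length) :
    findCoverage_alt M
      = S M.length (fun i => S (m - 1) (fun j => pInd (g M i j) (g M i (j + 1))))
        + S (M.length - 1) (fun i => S m (fun j => pInd (g M i j) (g M (i + 1) j))) := by
  have hrow : ∀ i, i < M.length →
      (M.map (fun row => row.take m)).getD i [] = (M.getD i []).take m := by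
    intro i hi
    rw [List.getD_eq_getElem _ _ (by simpa using hi), List.getElem_map,
        List.getD_eq_getElem M [] hi]
  have hrowlen : ∀ i, i < M.length →
      ((M.map (fun row => row.take m)).getD i []).length = m := by
    intro i hi
    have hmem : M.getD i [] ∈ M := by
      rw [List.getD_eq_getElem M [] hi]; exact List.getElem_mem hi
    rw [hrow i hi, List.length_take]
    have := hge _ hmem
    omega
  have hget : ∀ i, i < M.length → ∀ j, j < m →
      ((M.map (fun row => row.take m)).getD i []).getD j 0 = (M.getD i []).getD j 0 := by
    intro i hi j hj
    rw [hrow i hi]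
    exact take_getD _ m j hj
  unfold findCoverage_alt
  simp only [hm, PySem.List.slice_to_natCast]
  rw [show hRowStep = fun (ans : Int) (row : List Int) =>
        ans + (fun row : List Int =>
          S (row.length - 1) (fun j => pInd (row.getD j 0) (row.getD (j + 1) 0))) row
      from funext fun ans => funext fun row =>
        foldl_zip_drop pairStep pInd 0 pairStep_eq row ans]
  rw [PySem.List.foldl_add, zero_add, list_sum_index _ ([] : List Int)]
  rw [foldl_zip_drop vRowStep
      (fun r1 r2 : List Int =>
        S (min r1.length r2.length) (fun j => pInd (r1.getD j 0) (r2.getD j 0)))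
      ([] : List Int) (fun ans rr => foldl_zip2 rr.1 rr.2 ans)]
  simp only [List.length_map]
  congr 1
  · exact S_congr fun i hi => by
      rw [hrowlen i hi]
      exact S_congr fun j hj => by
        rw [hget i hi j (by omega), hget i hi (j + 1) (by omega)]; rfl
  · exact S_congr fun i hi => by
      have hi1 : i < M.length := by omega
      have hi2 : i + 1 < M.length := by omega
      rw [hrowlen i hi1, hrowlen (i + 1) hi2, Nat.min_self]
      exact S_congr fun j hj => by
        rw [hget i hi1 j hj, hget (i + 1) hi2 j hj]; rfl

-- the pure counting identity: A's four-direction count = horizontal + vertical pair counts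
theorem core (f : Nat → Nat → Int) (n m : Nat) :
    S n (fun i => S m (fun j => aCellg f n m i j))
      = S n (fun i => S (m - 1) (fun j => pInd (f i j) (f i (j + 1))))
        + S (n - 1) (fun i => S m (fun j => pInd (f i j) (f (i + 1) j))) := by
  have hsplit : ∀ i j, aCellg f n m i j
      = iInd (1 ≤ i ∧ (f i j = 0 ∧ f (i - 1) j = 1))
        + iInd ((i + 1 < n) ∧ (f i j = 0 ∧ f (i + 1) j = 1))
        + iInd (1 ≤ j ∧ (f i j = 0 ∧ f i (j - 1) = 1))
        + iInd ((j + 1 < m) ∧ (f i j = 0 ∧ f i (j + 1) = 1)) := by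
    intro i j
    by_cases hf : f i j = 0 <;> simp [aCellg, iInd, hf]
  have hstep1 : S n (fun i => S m (fun j => aCellg f n m i j))
      = S n (fun i => S m (fun j => iInd (1 ≤ i ∧ (f i j = 0 ∧ f (i - 1) j = 1))))
        + S n (fun i => S m (fun j => iInd ((i + 1 < n) ∧ (f i j = 0 ∧ f (i + 1) j = 1))))
        + S n (fun i => S m (fun j => iInd (1 ≤ j ∧ (f i j = 0 ∧ f i (j - 1) = 1))))
        + S n (fun i => S m (fun j => iInd ((j + 1 < m) ∧ (f i j = 0 ∧ f i (j + 1) = 1)))) := by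
    rw [← S_add, ← S_add, ← S_add]
    exact S_congr fun i _ => by
      rw [← S_add, ← S_add, ← S_add]
      exact S_congr fun j _ => hsplit i j
  -- top neighbors: shift the row index
  have hA1 : S n (fun i => S m (fun j => iInd (1 ≤ i ∧ (f i j = 0 ∧ f (i - 1) j = 1))))
      = S (n - 1) (fun i => S m (fun j => iInd (f (i + 1) j = 0 ∧ f i j = 1))) := by
    rw [S_shift_vanish n _ (by simp [iInd])]
    exact S_congr fun i _ => S_congr fun j _ => iInd_congr (by simp)
  -- bottom neighbors: absorb the bound on the row index
  have hA2 : S n (fun i => S m (fun j => iInd ((i + 1 < n) ∧ (f i j = 0 ∧ f (i + 1) j = 1))))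
      = S (n - 1) (fun i => S m (fun j => iInd (f i j = 0 ∧ f (i + 1) j = 1))) := by
    have : ∀ i, S m (fun j => iInd ((i + 1 < n) ∧ (f i j = 0 ∧ f (i + 1) j = 1)))
        = if i + 1 < n then S m (fun j => iInd (f i j = 0 ∧ f (i + 1) j = 1)) else 0 := by
      intro i
      rw [S_congr fun j _ => iInd_and_left (i + 1 < n) _, S_if_pull]
    rw [S_congr fun i _ => this i, S_truncate]
  -- left neighbors: shift the column index
  have hA3 : S n (fun i => S m (fun j => iInd (1 ≤ j ∧ (f i j = 0 ∧ f i (j - 1) = 1))))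
      = S n (fun i => S (m - 1) (fun j => iInd (f i (j + 1) = 0 ∧ f i j = 1))) := by
    exact S_congr fun i _ => by
      rw [S_shift_vanish m _ (by simp [iInd])]
      exact S_congr fun j _ => iInd_congr (by simp)
  -- right neighbors: absorb the bound on the column index
  have hA4 : S n (fun i => S m (fun j => iInd ((j + 1 < m) ∧ (f i j = 0 ∧ f i (j + 1) = 1))))
      = S n (fun i => S (m - 1) (fun j => iInd (f i j = 0 ∧ f i (j + 1) = 1))) := by
    exact S_congr fun i _ => by
      rw [S_congr fun j _ => iInd_and_left (j + 1 < m) _, S_truncate]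
  have hcombH : S n (fun i => S (m - 1) (fun j => iInd (f i j = 0 ∧ f i (j + 1) = 1)))
      + S n (fun i => S (m - 1) (fun j => iInd (f i (j + 1) = 0 ∧ f i j = 1)))
      = S n (fun i => S (m - 1) (fun j => pInd (f i j) (f i (j + 1)))) := by
    rw [← S_add]
    exact S_congr fun i _ => by
      rw [← S_add]
      exact S_congr fun j _ => pInd_split (f i j) (f i (j + 1))
  have hcombV : S (n - 1) (fun i => S m (fun j => iInd (f i j = 0 ∧ f (i + 1) j = 1)))
      + S (n - 1) (fun i => S m (fun j => iInd (f (i + 1) j = 0 ∧ f i j = 1)))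
      = S (n - 1) (fun i => S m (fun j => pInd (f i j) (f (i + 1) j))) := by
    rw [← S_add]
    exact S_congr fun i _ => by
      rw [← S_add]
      exact S_congr fun j _ => pInd_split (f i j) (f (i + 1) j)
  rw [hstep1, hA1, hA2, hA3, hA4]
  linarith [hcombH, hcombV]

-- ===== VERDICT (by name: the statement is the Claim_ definition above) =====
theorem findCoverage_spec : Claim_equal_findCoverage := by
  intro matrix hdom hpre
  obtain ⟨hne, hge⟩ := hpre
  unfold Spec_findCoverage
  have hm : (PySem.List.pyGetD matrix 0 []).length = (matrix.headD []).length := by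
    rw [PySem.List.pyGetD_zero]
    cases matrix with
    | nil => simp
    | cons a t => simp
  rw [A_sum matrix (matrix.headD []).length hm,
      B_sum matrix (matrix.headD []).length hm hge, core]
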